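-- pv_equiv track=rewrite | github.com/tqa236/advent-of-code | src/2023/day03/gear_ratios.py | get_row_number_locations
-- ===== SOURCE A (Python) =====
-- def get_full_number(row: str, index: int):
--     last_index = index
--     while last_index < len(row) and row[last_index].isdigit():
--         last_index += 1
--     return last_index - 1
--
-- def get_row_number_locations(row: str, row_index: int):
--     locations = []
--     last_index = -1
--     for i in range(len(row)):
--         if i <= last_index:
--             continue
--         if row[i].isdigit():
--             last_index = get_full_number(row, i)
--             locations.append((row_index, i, last_index))
--     return locations
-- ===== SOURCE B (Python) =====
-- def get_row_number_locations(row: str, row_index: int):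
--     locations = []
--     start = None
--     for i, ch in enumerate(row):
--         if ch.isdigit():
--             if start is None:
--                 start = i
--         elif start is not None:
--             locations.append((row_index, start, i - 1))
--             start = None
--     if start is not None:
--         locations.append((row_index, start, len(row) - 1))
--     return locations
-- ===== Notes on version B (the rewrite author's own statement) =====
-- stated objective: simpler
-- what changed: Replaces A's skip-ahead scanner (an inner while-loop helper that pre-computes each run's end plus an `i <= last_index` skip guard in the outer loop) with a single flat pass that keeps only the running start index of the current digit run and flushes a tuple when the run ends or the string does.
import Mathlib
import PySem

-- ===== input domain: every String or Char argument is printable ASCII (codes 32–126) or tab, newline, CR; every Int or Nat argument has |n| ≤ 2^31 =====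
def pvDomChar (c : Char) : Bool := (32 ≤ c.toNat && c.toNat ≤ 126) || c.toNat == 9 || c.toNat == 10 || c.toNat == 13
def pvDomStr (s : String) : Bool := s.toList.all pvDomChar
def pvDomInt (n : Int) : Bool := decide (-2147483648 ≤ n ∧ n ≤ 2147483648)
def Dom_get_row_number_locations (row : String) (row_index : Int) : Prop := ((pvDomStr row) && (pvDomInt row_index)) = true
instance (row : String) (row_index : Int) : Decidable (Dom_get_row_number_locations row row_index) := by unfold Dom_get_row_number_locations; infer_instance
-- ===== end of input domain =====

-- B replaces A's skip-ahead scanner (inner while-loop helper plus `i <= last_index` skipping)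
-- by one flat pass keeping the start index of the current digit run; objective: simpler.
-- Loops over indices are rendered as structural recursion on the remaining suffix of the
-- character list, carrying the current index i (so position i holds the suffix row[i:]).

-- ===== PORT A =====
-- `while last_index < len(row) and row[last_index].isdigit(): last_index += 1`;
-- `l` is the suffix row[i:], so `l = []` is exactly `last_index = len(row)`.
def gfn : List Char → Nat → Nat
  | [], i => i
  | c :: rest, i => if PySem.Chars.isdigit c then gfn rest (i+1) else i

-- get_full_number(row, index): scan row[index:], return last_index - 1
def get_full_number (l : List Char) (index : Nat) : Int :=
  (gfn l index : Int) - 1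

-- the `for i in range(len(row))` loop of A; state = (locations = acc, last_index = last)
def aLoop (ri : Int) : List Char → Nat → Int → List (Int × Int × Int) → List (Int × Int × Int)
  | [], _, _, acc => acc
  | c :: rest, i, last, acc =>
    if (i : Int) ≤ last then aLoop ri rest (i+1) last acc
    else if PySem.Chars.isdigit c then
      aLoop ri rest (i+1) (get_full_number (c :: rest) i)
        (acc ++ [(ri, (i : Int), get_full_number (c :: rest) i)])
    else aLoop ri rest (i+1) last acc

def get_row_number_locations (row : String) (row_index : Int) : List (Int × Int × Int) :=
  aLoop row_index row.toList 0 (-1) []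

-- ===== PORT B =====
-- B's enumerate loop; state = (locations = acc, start); n = len(row) so the exhausted-list
-- base case is Python's post-loop flush `(row_index, start, len(row) - 1)`.
def bLoop (ri : Int) (n : Int) : List Char → Nat → Option Nat → List (Int × Int × Int) → List (Int × Int × Int)
  | [], _, start, acc =>
    match start with
    | some s => acc ++ [(ri, (s : Int), n - 1)]
    | none => acc
  | c :: rest, i, start, acc =>
    if PySem.Chars.isdigit c then
      match start with
      | none => bLoop ri n rest (i+1) (some i) acc
      | some s => bLoop ri n rest (i+1) (some s) acc
    else
      match start with
      | some s => bLoop ri n rest (i+1) none (acc ++ [(ri, (s : Int), (i : Int) - 1)])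
      | none => bLoop ri n rest (i+1) none acc

def get_row_number_locations_alt (row : String) (row_index : Int) : List (Int × Int × Int) :=
  bLoop row_index (row.toList.length : Int) row.toList 0 none []

-- ===== PRECONDITION & SPEC =====
def Spec_get_row_number_locations (row : String) (row_index : Int) (out : List (Int × Int × Int)) : Prop := out = get_row_number_locations_alt row row_index
instance (row : String) (row_index : Int) (out : List (Int × Int × Int)) : Decidable (Spec_get_row_number_locations row row_index out) := by unfold Spec_get_row_number_locations; infer_instance

-- ===== CLAIM (what is proved, stated in full; the proofs are below) =====
def Claim_equal_get_row_number_locations : Prop := ∀ (row : String) (row_index : Int), Dom_get_row_number_locations row row_index → Spec_get_row_number_locations row row_index (get_row_number_locations row row_index)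

-- ===== LEMMAS AND PROOFS =====

theorem gfn_ge : ∀ (l : List Char) (i : Nat), i ≤ gfn l i := by
  intro l
  induction l with
  | nil => intro i; simp [gfn]
  | cons c rest ih =>
    intro i
    simp only [gfn]
    split
    · have := ih (i+1); omega
    · omega

theorem gfn_le : ∀ (l : List Char) (i : Nat), gfn l i ≤ i + l.length := by
  intro l
  induction l with
  | nil => intro i; simp [gfn]
  | cons c rest ih =>
    intro i
    simp only [gfn, List.length_cons]
    split
    · have := ih (i+1); omega
    · omega

theorem gfn_stop : ∀ (l : List Char) (i : Nat) (c' : Char) (rest' : List Char),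
    l.drop (gfn l i - i) = c' :: rest' → PySem.Chars.isdigit c' = false := by
  intro l
  induction l with
  | nil => intro i c' rest' h; simp at h
  | cons c rest ih =>
    intro i c' rest' h
    by_cases hd : PySem.Chars.isdigit c = true
    · rw [show gfn (c :: rest) i = gfn rest (i+1) by simp [gfn, hd]] at h
      have h1 : i + 1 ≤ gfn rest (i+1) := gfn_ge rest (i+1)
      rw [show gfn rest (i+1) - i = (gfn rest (i+1) - (i+1)) + 1 by omega,
          List.drop_succ_cons] at h
      exact ih (i+1) c' rest' h
    · rw [show gfn (c :: rest) i = i by simp [gfn, hd]] at h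
      simp only [Nat.sub_self, List.drop_zero] at h
      cases h
      simpa using hd

-- A skips every index i ≤ last_index after taking a whole run
theorem aLoop_skip (ri : Int) : ∀ (l : List Char) (i k : Nat) (acc : List (Int × Int × Int)),
    i ≤ k → aLoop ri l i ((k : Int) - 1) acc = aLoop ri (l.drop (k - i)) k ((k : Int) - 1) acc := by
  intro l
  induction l with
  | nil => intro i k acc _; simp [aLoop]
  | cons c rest ih =>
    intro i k acc hik
    rcases Nat.eq_or_lt_of_le hik with heq | hlt
    · subst heq; simp
    · rw [aLoop]
      have h1 : (i : Int) ≤ (k : Int) - 1 := by omega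
      rw [if_pos h1]
      rw [show k - i = (k - (i+1)) + 1 by omega, List.drop_succ_cons]
      exact ih (i+1) k acc (by omega)

-- B walks through a digit run keeping its start
theorem bLoop_run (ri n : Int) : ∀ (l : List Char) (i s : Nat) (acc : List (Int × Int × Int)),
    bLoop ri n l i (some s) acc = bLoop ri n (l.drop (gfn l i - i)) (gfn l i) (some s) acc := by
  intro l
  induction l with
  | nil => intro i s acc; simp [gfn]
  | cons c rest ih =>
    intro i s acc
    by_cases hd : PySem.Chars.isdigit c = true
    · rw [show gfn (c :: rest) i = gfn rest (i+1) by simp [gfn, hd]]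
      rw [bLoop, if_pos hd]
      have h1 : i + 1 ≤ gfn rest (i+1) := gfn_ge rest (i+1)
      rw [show gfn rest (i+1) - i = (gfn rest (i+1) - (i+1)) + 1 by omega,
          List.drop_succ_cons]
      exact ih (i+1) s acc
    · rw [show gfn (c :: rest) i = i by simp [gfn, hd]]
      simp

theorem mainLemma (ri n : Int) : ∀ (m : Nat) (l : List Char), l.length ≤ m →
    ∀ (i : Nat) (last : Int) (acc : List (Int × Int × Int)),
      last < (i : Int) → (i : Int) + (l.length : Int) = n →
      aLoop ri l i last acc = bLoop ri n l i none acc := by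
  intro m
  induction m with
  | zero =>
    intro l hl i last acc _ _
    have : l = [] := List.eq_nil_of_length_eq_zero (by omega)
    subst this
    simp [aLoop, bLoop]
  | succ m ih =>
    intro l hl i last acc hlast hn
    cases l with
    | nil => simp [aLoop, bLoop]
    | cons c rest =>
      simp only [List.length_cons] at hl hn
      by_cases hd : PySem.Chars.isdigit c = true
      · -- digit: A takes the whole run at once, B walks through it
        have hrw : gfn rest (i+1) = gfn (c :: rest) i := by simp [gfn, hd]
        rw [aLoop, bLoop, if_neg (by omega), if_pos hd, if_pos hd]
        rw [bLoop_run, hrw]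
        have hgf : get_full_number (c :: rest) i = ((gfn (c :: rest) i : Int) - 1) := rfl
        rw [hgf]
        have hj1 : i + 1 ≤ gfn (c :: rest) i := by
          have := gfn_ge rest (i+1); omega
        have hj2 : gfn (c :: rest) i ≤ i + 1 + rest.length := by
          have := gfn_le rest (i+1); omega
        rw [aLoop_skip ri rest (i+1) (gfn (c :: rest) i) _ hj1]
        cases hcase : rest.drop (gfn (c :: rest) i - (i+1)) with
        | nil =>
          -- the run reaches the end of the string
          have hlen := congrArg List.length hcase
          simp only [List.length_drop, List.length_nil] at hlen
          rw [aLoop, bLoop]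
          have : n - 1 = ((gfn (c :: rest) i : Int) - 1) := by
            push_cast at hn ⊢
            omega
          rw [this]
        | cons c' rest' =>
          have hstop : PySem.Chars.isdigit c' = false := by
            apply gfn_stop (c :: rest) i c' rest'
            rw [show gfn (c :: rest) i - i = (gfn (c :: rest) i - (i+1)) + 1 by omega,
                List.drop_succ_cons, hcase]
          have hlen := congrArg List.length hcase
          simp only [List.length_drop, List.length_cons] at hlen
          rw [aLoop, bLoop]
          rw [if_neg (by omega : ¬ ((gfn (c :: rest) i : Int) ≤ (gfn (c :: rest) i : Int) - 1))]
          rw [if_neg (by simp [hstop]), if_neg (by simp [hstop])]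
          refine ih rest' (by omega) (gfn (c :: rest) i + 1)
            ((gfn (c :: rest) i : Int) - 1) _ (by push_cast; omega) ?_
          push_cast at hn ⊢
          omega
      · -- non-digit: both just advance
        rw [aLoop, bLoop, if_neg (by omega), if_neg hd, if_neg hd]
        refine ih rest (by omega) (i+1) last acc (by omega) ?_
        push_cast at hn ⊢
        omega

-- ===== VERDICT (by name: the statement is the Claim_ definition above) =====
theorem get_row_number_locations_spec : Claim_equal_get_row_number_locations := by
  intro row row_index _
  unfold Spec_get_row_number_locations get_row_number_locations get_row_number_locations_alt
  exact mainLemma row_index (row.toList.length : Int) row.toList.length row.toList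
    (Nat.le_refl _) 0 (-1) [] (by omega) (by simp)
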